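-- pv_equiv track=rewrite | github.com/ErickLopez76/mailsbackup | mailsbackup/mailsbackuptools.py | convert_listmail_to_array
-- ===== SOURCE A (Python) =====
-- def convert_listmail_to_array(list):
--     stonum = ''
--     result_list = []
--     for s in list:
--         if s.isnumeric():
--             stonum += s
--         if s.isspace() and len(stonum) > 0:
--             result_list.append(int(stonum))
--             stonum = ''
--     return result_list
-- ===== SOURCE B (Python) =====
-- from itertools import groupby
--
--
-- def convert_listmail_to_array(list):
--     result = []
--     acc = ''
--     for is_ws, group in groupby(list, key=str.isspace):
--         if is_ws:
--             if acc:
--                 result.append(int(acc))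
--                 acc = ''
--         else:
--             acc += ''.join(c for c in group if c.isnumeric())
--     return result
-- ===== Notes on version B (the rewrite author's own statement) =====
-- stated objective: idiomatic
-- what changed: B walks the string as alternating whitespace/non-whitespace runs (itertools.groupby on str.isspace), filtering numerics per run and flushing the accumulator once per whitespace run, instead of A's per-character two-test loop.
import Mathlib
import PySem

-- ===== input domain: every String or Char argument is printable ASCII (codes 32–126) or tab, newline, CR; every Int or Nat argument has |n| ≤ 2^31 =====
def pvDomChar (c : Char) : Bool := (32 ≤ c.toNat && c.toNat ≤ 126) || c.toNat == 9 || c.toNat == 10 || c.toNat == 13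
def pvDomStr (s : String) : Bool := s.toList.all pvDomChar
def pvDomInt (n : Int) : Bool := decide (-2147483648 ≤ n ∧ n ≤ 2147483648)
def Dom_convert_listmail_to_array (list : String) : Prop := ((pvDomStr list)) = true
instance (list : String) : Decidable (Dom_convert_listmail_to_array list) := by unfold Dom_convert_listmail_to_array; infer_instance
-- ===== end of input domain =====

-- B rewrites A's per-character loop as a walk over alternating whitespace/non-whitespace runs
-- (Python: itertools.groupby on str.isspace), flushing the digit accumulator once per whitespace run.
-- Objective: idiomatic; same O(n) cost; return values proved equal on the whole stated ASCII domain.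
-- c.isnumeric() is ported as PySem.Chars.isdigit: exact on the stated ASCII domain (they coincide there).

-- ===== PORT A =====
-- per-character step: stonum/result_list state, exactly A's two tests in order.
-- int(stonum) is ported as (PySem.Int.ofChars? stonum).getD 0: exact here, since the branch runs
-- only with stonum a nonempty string of digits, on which ofChars? is some.
def pvStepA (st : List Char × List Int) (s : Char) : List Char × List Int :=
  let stonum := if PySem.Chars.isdigit s then st.1 ++ [s] else st.1
  if PySem.Chars.isspace s = true ∧ stonum.length > 0 then
    ([], st.2 ++ [(PySem.Int.ofChars? stonum).getD 0])
  else
    (stonum, st.2)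

def convert_listmail_to_array (list : String) : List Int :=
  (list.toList.foldl pvStepA ([], [])).2

-- ===== PORT B =====
-- maximal runs of equal str.isspace key, as itertools.groupby(list, key=str.isspace) produces them
def pvRuns (cs : List Char) : List (List Char) :=
  match cs with
  | [] => []
  | c :: rest =>
    (c :: rest.takeWhile (fun d => PySem.Chars.isspace d == PySem.Chars.isspace c))
      :: pvRuns (rest.dropWhile (fun d => PySem.Chars.isspace d == PySem.Chars.isspace c))
termination_by cs.length
decreasing_by
  have := List.length_dropWhile_le (fun d => PySem.Chars.isspace d == PySem.Chars.isspace c) rest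
  simp; omega

-- per-run step: flush the accumulator on a whitespace run, collect numerics on a non-whitespace run
def pvStepB (st : List Char × List Int) (g : List Char) : List Char × List Int :=
  match g with
  | [] => st
  | c :: _ =>
    if PySem.Chars.isspace c then
      if st.1 ≠ [] then ([], st.2 ++ [(PySem.Int.ofChars? st.1).getD 0]) else st
    else
      (st.1 ++ g.filter PySem.Chars.isdigit, st.2)

def convert_listmail_to_array_alt (list : String) : List Int :=
  ((pvRuns list.toList).foldl pvStepB ([], [])).2

-- ===== PRECONDITION & SPEC =====
def Spec_convert_listmail_to_array (list : String) (out : List Int) : Prop := out = convert_listmail_to_array_alt list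
instance (list : String) (out : List Int) : Decidable (Spec_convert_listmail_to_array list out) := by unfold Spec_convert_listmail_to_array; infer_instance

-- ===== CLAIM (what is proved, stated in full; the proofs are below) =====
def Claim_equal_convert_listmail_to_array : Prop := ∀ (list : String), Dom_convert_listmail_to_array list → Spec_convert_listmail_to_array list (convert_listmail_to_array list)

-- ===== LEMMAS AND PROOFS =====

theorem pv_isspace_not_isdigit (c : Char) (h : PySem.Chars.isspace c = true) :
    PySem.Chars.isdigit c = false := by
  have h0 : ('0' ≤ c) ↔ 48 ≤ c.toNat := by
    rw [Char.le_def, UInt32.le_iff_toNat_le]; exact Iff.rfl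
  have h9 : (c ≤ '9') ↔ c.toNat ≤ 57 := by
    rw [Char.le_def, UInt32.le_iff_toNat_le]; exact Iff.rfl
  simp only [PySem.Chars.isspace, decide_eq_true_eq, Bool.or_eq_true, Bool.and_eq_true] at h
  simp only [PySem.Chars.isdigit, Bool.and_eq_false_iff, decide_eq_false_iff_not, h0, h9]
  omega

-- A's fold over a whitespace run flushes once (if the accumulator is nonempty) and then idles
theorem pv_foldA_space (g : List Char) (hg : ∀ c ∈ g, PySem.Chars.isspace c = true) :
    ∀ (acc : List Char) (res : List Int), g.foldl pvStepA (acc, res) =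
      ((if g = [] then acc else []),
       if g = [] ∨ acc = [] then res else res ++ [(PySem.Int.ofChars? acc).getD 0]) := by
  induction g with
  | nil => intro acc res; simp
  | cons c g ih =>
    intro acc res
    have hc : PySem.Chars.isspace c = true := hg c (List.mem_cons_self ..)
    have hd : PySem.Chars.isdigit c = false := pv_isspace_not_isdigit c hc
    have hg' : ∀ x ∈ g, PySem.Chars.isspace x = true := fun x hx => hg x (List.mem_cons_of_mem _ hx)
    simp only [List.foldl_cons]
    by_cases hacc : acc = []
    · subst hacc
      have h1 : pvStepA (([] : List Char), res) c = ([], res) := by simp [pvStepA, hd, hc]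
      rw [h1, ih hg']
      simp
    · have h1 : pvStepA (acc, res) c = ([], res ++ [(PySem.Int.ofChars? acc).getD 0]) := by
        have hlen : acc.length > 0 := List.length_pos_of_ne_nil hacc
        simp [pvStepA, hc, hd, hlen]
      rw [h1, ih hg']
      simp [hacc]

-- A's fold over a non-whitespace run appends that run's digits to the accumulator
theorem pv_foldA_nonspace (g : List Char) (hg : ∀ c ∈ g, PySem.Chars.isspace c = false)
    (acc : List Char) (res : List Int) :
    g.foldl pvStepA (acc, res) = (acc ++ g.filter PySem.Chars.isdigit, res) := by
  induction g generalizing acc with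
  | nil => simp
  | cons c g ih =>
    have hc : PySem.Chars.isspace c = false := hg c (List.mem_cons_self ..)
    have hg' : ∀ x ∈ g, PySem.Chars.isspace x = false := fun x hx => hg x (List.mem_cons_of_mem _ hx)
    simp only [List.foldl_cons]
    have h1 : pvStepA (acc, res) c =
        ((if PySem.Chars.isdigit c then acc ++ [c] else acc), res) := by
      simp [pvStepA, hc]
    rw [h1, ih hg']
    by_cases hd : PySem.Chars.isdigit c = true
    · simp [hd]
    · simp only [Bool.not_eq_true] at hd; simp [hd]

-- main invariant: the character fold and the run fold move through the same states
theorem pv_fold_eq (cs : List Char) :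
    ∀ st : List Char × List Int,
      cs.foldl pvStepA st = (pvRuns cs).foldl pvStepB st := by
  induction cs using pvRuns.induct with
  | case1 => intro st; simp [pvRuns]
  | case2 c rest ih =>
    intro st
    obtain ⟨acc, res⟩ := st
    rw [pvRuns]
    set k : Char → Bool := fun d => PySem.Chars.isspace d == PySem.Chars.isspace c with hk
    have hsplit : c :: rest = (c :: rest.takeWhile k) ++ rest.dropWhile k := by
      simp [List.takeWhile_append_dropWhile]
    have hkey : ∀ x ∈ c :: rest.takeWhile k, PySem.Chars.isspace x = PySem.Chars.isspace c := by
      intro x hx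
      rcases List.mem_cons.mp hx with rfl | hx
      · rfl
      · have := List.mem_takeWhile_imp hx
        simpa [hk] using this
    conv_lhs => rw [hsplit]
    rw [List.foldl_append]
    conv_rhs => rw [List.foldl_cons]
    rw [← ih]
    congr 1
    by_cases hws : PySem.Chars.isspace c = true
    · have hall : ∀ x ∈ c :: rest.takeWhile k, PySem.Chars.isspace x = true :=
        fun x hx => (hkey x hx).trans hws
      rw [pv_foldA_space _ hall]
      by_cases hacc : acc = [] <;> simp [pvStepB, hws, hacc]
    · simp only [Bool.not_eq_true] at hws
      have hall : ∀ x ∈ c :: rest.takeWhile k, PySem.Chars.isspace x = false :=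
        fun x hx => (hkey x hx).trans hws
      rw [pv_foldA_nonspace _ hall]
      simp [pvStepB, hws]

-- ===== VERDICT (by name: the statement is the Claim_ definition above) =====
theorem convert_listmail_to_array_spec : Claim_equal_convert_listmail_to_array := by
  intro list _
  unfold Spec_convert_listmail_to_array convert_listmail_to_array convert_listmail_to_array_alt
  rw [pv_fold_eq]
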